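-- pv_equiv track=rewrite | github.com/shah541-g/Problem-Solving | src/Previous/Eleventh_June/Noshad/main.py | move_spaces_to_end_optimized
-- ===== SOURCE A (Python) =====
-- def move_spaces_to_end_optimized(s: str) -> str:
--   spaces_count = 0
--   new_s = list()
--
--   for char in s:
--     if char == " ":
--       spaces_count += 1
--     else:
--       new_s.append(char)
--
--   new_s.extend([" "] * spaces_count)
--
--   return "".join(new_s)
-- ===== SOURCE B (Python) =====
-- def move_spaces_to_end_optimized(s: str) -> str:
--     return "".join(sorted(s, key=lambda c: c == " "))
-- ===== Notes on version B (the rewrite author's own statement) =====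
-- stated objective: idiomatic
-- what changed: Replaces the explicit counting loop plus padding step by a single stable sort on the boolean key c == ' ', which pushes spaces to the end while stability preserves the order of the other characters.
import Mathlib
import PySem

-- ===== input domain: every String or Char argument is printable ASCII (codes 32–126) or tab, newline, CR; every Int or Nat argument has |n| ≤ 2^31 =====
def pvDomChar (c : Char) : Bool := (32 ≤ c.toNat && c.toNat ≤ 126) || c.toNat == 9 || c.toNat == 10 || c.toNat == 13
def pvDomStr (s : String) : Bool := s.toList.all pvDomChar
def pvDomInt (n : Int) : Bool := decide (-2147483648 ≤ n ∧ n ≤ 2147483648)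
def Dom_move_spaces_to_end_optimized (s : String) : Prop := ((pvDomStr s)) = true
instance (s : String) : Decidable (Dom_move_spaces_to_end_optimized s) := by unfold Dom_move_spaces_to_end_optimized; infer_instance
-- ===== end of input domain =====

-- B replaces A's counting loop + padding by one stable sort on the key (c == ' '): more idiomatic, same result.


-- ===== PORT A =====
-- loop over the characters, counting spaces and appending non-spaces; then pad with the counted spaces
def move_spaces_to_end_optimized (s : String) : String :=
  let r := s.toList.foldl
    (fun (st : Nat × List Char) char =>
      if char = ' ' then (st.1 + 1, st.2) else (st.1, st.2 ++ [char]))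
    (0, [])
  String.mk (r.2 ++ List.replicate r.1 ' ')

-- ===== PORT B =====
-- "".join(sorted(s, key=lambda c: c == " ")): stable sort on the boolean key; joining the
-- resulting one-character strings is exactly String.mk of the sorted character list
def move_spaces_to_end_optimized_alt (s : String) : String :=
  String.mk (PySem.List.sorted s.toList (fun c => c == ' ') false)

-- ===== PRECONDITION & SPEC =====
def Spec_move_spaces_to_end_optimized (s : String) (out : String) : Prop := out = move_spaces_to_end_optimized_alt s
instance (s : String) (out : String) : Decidable (Spec_move_spaces_to_end_optimized s out) := by unfold Spec_move_spaces_to_end_optimized; infer_instance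

-- ===== CLAIM (what is proved, stated in full; the proofs are below) =====
def Claim_equal_move_spaces_to_end_optimized : Prop := ∀ (s : String), Dom_move_spaces_to_end_optimized s → Spec_move_spaces_to_end_optimized s (move_spaces_to_end_optimized s)

-- ===== LEMMAS AND PROOFS =====

-- A's loop, characterised: after the whole pass the counter is the number of spaces and the
-- accumulator is the subsequence of non-space characters.
theorem pvFoldA (l : List Char) : ∀ (n : Nat) (acc : List Char),
    l.foldl (fun (st : Nat × List Char) char =>
      if char = ' ' then (st.1 + 1, st.2) else (st.1, st.2 ++ [char])) (n, acc)
    = (n + l.count ' ', acc ++ l.filter (fun c => !(c == ' '))) := by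
  induction l with
  | nil => intro n acc; simp
  | cons c t ih =>
    intro n acc
    by_cases hc : c = ' '
    · subst hc; simp [List.foldl_cons, ih]; omega
    · simp [List.foldl_cons, hc, ih]

theorem pvInsertBy_cons (b : Char → Char → Bool) (x y : Char) (ys : List Char) :
    PySem.List.insertBy b x (y :: ys)
      = if b x y then x :: y :: ys else y :: PySem.List.insertBy b x ys := by
  simp [PySem.List.insertBy]

-- inserting x before-the-first-hit into ns ++ sps, where x goes after all of ns and before all of sps
theorem pvInsertBy_mid (b : Char → Char → Bool) (x : Char) (ns sps : List Char)
    (h1 : ∀ a ∈ ns, b x a = false) (h2 : ∀ a ∈ sps, b x a = true) :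
    PySem.List.insertBy b x (ns ++ sps) = ns ++ x :: sps := by
  induction ns with
  | nil =>
    cases sps with
    | nil => simp [PySem.List.insertBy]
    | cons s t => simp [pvInsertBy_cons, h2 s (by simp)]
  | cons a t ih =>
    have hx : b x a = false := h1 a (by simp)
    simp [pvInsertBy_cons, hx]
    exact ih (fun a ha => h1 a (by simp [ha]))

-- invariant of the insertion sort with key (c == ' '): starting from non-spaces ++ spaces it
-- stays in that shape, appending non-spaces to the first block and spaces to the second
theorem pvSortLoop (l : List Char) : ∀ (ns : List Char) (n : Nat),
    (∀ c ∈ ns, (c == ' ') = false) →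
    l.foldl (fun acc x =>
        PySem.List.insertBy (fun a b => decide ((a == ' ') < (b == ' '))) x acc)
      (ns ++ List.replicate n ' ')
    = (ns ++ l.filter (fun c => !(c == ' '))) ++ List.replicate (n + l.count ' ') ' ' := by
  induction l with
  | nil => intro ns n _; simp
  | cons c t ih =>
    intro ns n hns
    by_cases hc : c = ' '
    · subst hc
      have : PySem.List.insertBy (fun a b => decide ((a == ' ') < (b == ' '))) ' '
          (ns ++ List.replicate n ' ') = (ns ++ List.replicate n ' ') ++ [' '] := by
        apply PySem.List.insertBy_of_forall_not_before
        intro y _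
        simp [Bool.lt_iff]
      rw [List.foldl_cons, this]
      have hrep : (ns ++ List.replicate n ' ') ++ [' '] = ns ++ List.replicate (n + 1) ' ' := by
        simp [List.replicate_succ']
      rw [hrep, ih ns (n + 1) hns]
      simp
      omega
    · have hkey : (c == ' ') = false := by simp [hc]
      have : PySem.List.insertBy (fun a b => decide ((a == ' ') < (b == ' '))) c
          (ns ++ List.replicate n ' ') = (ns ++ [c]) ++ List.replicate n ' ' := by
        rw [pvInsertBy_mid]
        · simp
        · intro a ha; simp [hkey, hns a ha]
        · intro a ha
          have : a = ' ' := List.eq_of_mem_replicate ha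
          simp [this, Bool.lt_iff, hkey]
      have hns' : ∀ d ∈ ns ++ [c], (d == ' ') = false := by
        intro d hd
        rcases List.mem_append.mp hd with h | h
        · exact hns d h
        · simp at h; simp [h, hkey]
      rw [List.foldl_cons, this, ih (ns ++ [c]) n hns']
      simp [hkey, hc]

theorem pvSorted_eq (l : List Char) :
    PySem.List.sorted l (fun c => c == ' ') false
      = l.filter (fun c => !(c == ' ')) ++ List.replicate (l.count ' ') ' ' := by
  have h := pvSortLoop l [] 0 (by simp)
  simpa [PySem.List.sorted] using h

-- ===== VERDICT (by name: the statement is the Claim_ definition above) =====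
theorem move_spaces_to_end_optimized_spec : Claim_equal_move_spaces_to_end_optimized := by
  intro s _
  unfold Spec_move_spaces_to_end_optimized move_spaces_to_end_optimized move_spaces_to_end_optimized_alt
  rw [pvSorted_eq, pvFoldA]
  simp
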